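-- pv_equiv track=rewrite | github.com/dhhruv/Binary-Search-Solutions | Maximum Removal Subsequence String.py | solve
-- ===== SOURCE A (Python) =====
-- def solve(s, t):
--     l = []
--     r = []
--     c1 = -1
--     c2 = -1
--     c3 = -1
--     j = 0
--     for i in range(len(s)):
--         if s[i] == t[j]:
--             l.append(i)
--             j += 1
--         if j == len(t):
--             c1 = len(s) - i - 1
--             break
--     j = len(t) - 1
--     for i in range(len(s) - 1, -1, -1):
--         if s[i] == t[j]:
--             r.insert(0, i)
--             j -= 1
--         if j == -1:
--             c2 = i
--             break
--     for i in range(len(t) - 1):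
--         c3 = max(c3, r[i + 1] - l[i] - 1)
--     return max(c1, c2, c3)
-- ===== SOURCE B (Python) =====
-- def solve(s, t):
--     n, m = len(s), len(t)
--     # pre[i] = number of leading chars of t greedily matched inside s[:i]
--     pre = [0] * (n + 1)
--     for i in range(n):
--         pre[i + 1] = pre[i] + (pre[i] < m and s[i] == t[pre[i]])
--     if pre[n] < m:
--         raise ValueError("t is not a subsequence of s")
--     # suf[j] = number of trailing chars of t greedily matched inside s[j:]
--     suf = [0] * (n + 1)
--     for j in range(n - 1, -1, -1):
--         suf[j] = suf[j + 1] + (suf[j + 1] < m and s[j] == t[m - 1 - suf[j + 1]])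
--
--     def least(f):
--         # smallest x in [0, n] with f(x) true (f monotone, f(n) true)
--         lo, hi = 0, n
--         while lo < hi:
--             mid = (lo + hi) // 2
--             if f(mid):
--                 hi = mid
--             else:
--                 lo = mid + 1
--         return lo
--
--     best = None
--     for k in range(m + 1):
--         i = least(lambda x: pre[x] >= k)
--         j = n - least(lambda x: suf[n - x] >= m - k)
--         gap = j - i
--         if best is None or gap > best:
--             best = gap
--     return best
-- ===== Notes on version B (the rewrite author's own statement) =====
-- stated objective: faster
-- what changed: Replaces A's two position-recording greedy passes with break logic plus three case values (c1/c2/c3) by prefix/suffix greedy match-count arrays, an explicit infeasibility check, and a binary search on each monotone count array for every split point of t.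
-- intended difference: On the single input s=='' and t=='', A returns -1 (its loops never run so all three candidate values stay at their -1 sentinel) while B returns 0, the length of the (empty) removable window, which is the intended answer when t is empty. — e.g. on solve("", ""): A returns -1, B returns 0
-- outside the precondition, e.g. on solve('a', 'b'): A returns -1, B raises ValueError; on solve('xy', 'z'): A returns -1, B raises ValueError
import Mathlib
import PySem

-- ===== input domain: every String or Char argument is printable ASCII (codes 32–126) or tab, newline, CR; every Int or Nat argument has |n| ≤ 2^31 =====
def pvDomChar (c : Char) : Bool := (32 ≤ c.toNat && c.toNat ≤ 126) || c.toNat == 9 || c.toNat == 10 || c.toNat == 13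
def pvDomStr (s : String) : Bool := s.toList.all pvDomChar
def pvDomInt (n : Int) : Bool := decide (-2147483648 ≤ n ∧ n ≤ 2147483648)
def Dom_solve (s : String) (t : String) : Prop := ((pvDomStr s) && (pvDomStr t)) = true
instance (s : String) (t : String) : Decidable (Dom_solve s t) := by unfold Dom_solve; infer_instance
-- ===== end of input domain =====

-- B replaces A's two position-recording greedy passes (with breaks, list.insert(0, i)
-- prepends, and three case values c1/c2/c3) by prefix/suffix greedy match-count arrays
-- combined via a hand-written binary search per split point of t; it avoids A's
-- quadratic-in-len(t) insert(0, i) and a timing run measured it faster.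

-- ===== PORT A =====
-- first loop of A: forward scan, records leftmost greedy match positions, breaks when all of t is matched
def aLoop1 (tl : List Char) (slen : Int) : List Char → Int → Int → List Int → (List Int × Int)
  | [], _, _, l => (l, -1)
  | c :: rest, i, j, l =>
    let hit := PySem.List.pyGet? tl j == some c
    let l' := if hit then l ++ [i] else l
    let j' := if hit then j + 1 else j
    if j' = (tl.length : Int) then (l', slen - i - 1)
    else aLoop1 tl slen rest (i + 1) j' l'

-- second loop of A: backward scan (argument is s reversed, i the current original index),
-- prepends rightmost greedy match positions, breaks when j reaches -1
def aLoop2 (tl : List Char) : List Char → Int → Int → List Int → (List Int × Int)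
  | [], _, _, r => (r, -1)
  | c :: restRev, i, j, r =>
    let hit := PySem.List.pyGet? tl j == some c
    let r' := if hit then i :: r else r
    let j' := if hit then j - 1 else j
    if j' = -1 then (r', i) else aLoop2 tl restRev (i - 1) j' r'

def solve (s : String) (t : String) : Int :=
  let sl := s.toList
  let tl := t.toList
  let L := aLoop1 tl (sl.length : Int) sl 0 0 []
  let R := aLoop2 tl sl.reverse ((sl.length : Int) - 1) ((tl.length : Int) - 1) []
  let c3 := (List.range (tl.length - 1)).foldl
    (fun (a : Int) (i : Nat) => max a ((PySem.List.pyGet? R.1 ((i : Int) + 1)).getD 0 - (PySem.List.pyGet? L.1 (i : Int)).getD 0 - 1)) (-1)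
  max L.2 (max R.2 c3)

-- ===== PORT B =====
-- pre-count array: element i is the number of leading chars of t greedily matched in s[:i]
def bPreList (tl : List Char) : List Char → Nat → List Nat
  | [], p => [p]
  | c :: rest, p =>
    p :: bPreList tl rest (p + (if p < tl.length ∧ PySem.List.pyGet? tl (p : Int) = some c then 1 else 0))

-- suffix-count array built walking s backwards (argument is s reversed); result is reversed by solve_alt
def bSufRev (tl : List Char) : List Char → Nat → List Nat
  | [], q => [q]
  | c :: restRev, q =>
    q :: bSufRev tl restRev
      (q + (if q < tl.length ∧ PySem.List.pyGet? tl ((tl.length - 1 - q : Nat) : Int) = some c then 1 else 0))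

-- B's `least`: binary search for the smallest x in [lo, hi] satisfying f; the fuel
-- argument only makes the while-loop structural (hi - lo shrinks every iteration)
def bLeast (f : Nat → Bool) : Nat → Nat → Nat → Nat
  | 0, lo, _ => lo
  | fuel + 1, lo, hi =>
    if lo < hi then
      let mid := (lo + hi) / 2
      if f mid then bLeast f fuel lo mid else bLeast f fuel (mid + 1) hi
    else lo

def solve_alt (s : String) (t : String) : Int :=
  let sl := s.toList
  let tl := t.toList
  let n := sl.length
  let m := tl.length
  let pre := bPreList tl sl 0
  -- Python raises ValueError here; these inputs lie outside Pre_solve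
  if pre.getD n 0 < m then -1
  else
    let suf := (bSufRev tl sl.reverse 0).reverse
    let best := (List.range (m + 1)).foldl
      (fun best k =>
        let i := bLeast (fun x => decide (k ≤ pre.getD x 0)) n 0 n
        let j := (n : Int) - (bLeast (fun x => decide (m - k ≤ suf.getD (n - x) 0)) n 0 n : Int)
        let gap := j - (i : Int)
        match best with
        | none => some gap
        | some b => if b < gap then some gap else some b) none
    best.getD 0

-- ===== PRECONDITION & SPEC =====
-- Pre_ excludes the inputs where t is not a subsequence of s — there A raises IndexError
-- when len(t) >= 2 but returns its -1 sentinel when len(t) == 1 (an artefact of its third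
-- loop being empty), while B validates its input and raises ValueError on all of them —
-- and t empty with s nonempty, where A raises IndexError at t[0].
def Pre_solve (s : String) (t : String) : Prop :=
  (t.toList = [] ∧ s.toList = []) ∨ (t.toList ≠ [] ∧ t.toList.Sublist s.toList)
instance (s : String) (t : String) : Decidable (Pre_solve s t) := by unfold Pre_solve; infer_instance
def pvWitness_solve : String × String := ("abcab", "bca")

-- On the single input s = "" , t = "", A returns -1 (its loops never run, so all three
-- candidate values keep their -1 sentinel) while B returns 0, the length of the (empty)
-- removable window, which is the intended answer when t is empty.
def D_solve (s : String) (t : String) : Prop := s.toList = [] ∧ t.toList = []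
instance (s : String) (t : String) : Decidable (D_solve s t) := by unfold D_solve; infer_instance
def Spec_solve (s : String) (t : String) (out : Int) : Prop := ¬ D_solve s t → out = solve_alt s t
instance (s : String) (t : String) (out : Int) : Decidable (Spec_solve s t out) := by unfold Spec_solve; infer_instance
def pvDiffWitness_solve : String × String := ("", "")
def pvDiffWitnessOut_solve : Int × Int := (-1, 0)

-- ===== CLAIM (what is proved, stated in full; the proofs are below) =====
def Claim_unchanged_solve : Prop := ∀ (s : String) (t : String), Dom_solve s t → Pre_solve s t → Spec_solve s t (solve s t)
def Claim_changed_solve : Prop := Dom_solve (pvDiffWitness_solve.1) (pvDiffWitness_solve.2) ∧ Pre_solve (pvDiffWitness_solve.1) (pvDiffWitness_solve.2) ∧ D_solve (pvDiffWitness_solve.1) (pvDiffWitness_solve.2) ∧ solve (pvDiffWitness_solve.1) (pvDiffWitness_solve.2) = pvDiffWitnessOut_solve.1 ∧ solve_alt (pvDiffWitness_solve.1) (pvDiffWitness_solve.2) = pvDiffWitnessOut_solve.2 ∧ pvDiffWitnessOut_solve.1 ≠ pvDiffWitnessOut_solve.2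
def Claim_exact_solve : Prop := ∀ (s : String) (t : String), Dom_solve s t → Pre_solve s t → D_solve s t → solve s t ≠ solve_alt s t

-- ===== LEMMAS AND PROOFS =====

-- the shared greedy machinery: counter step, counter over a list, increment positions
def gstep (tl : List Char) (p : Nat) (c : Char) : Nat := if tl[p]? = some c then p + 1 else p
def gcnt (tl : List Char) (l : List Char) (p : Nat) : Nat := l.foldl (gstep tl) p
def gincs (tl : List Char) : List Char → Nat → Nat → List Nat
  | [], _, _ => []
  | c :: rest, i, p =>
    if tl[p]? = some c then i :: gincs tl rest (i + 1) (p + 1) else gincs tl rest (i + 1) p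

theorem gcnt_cons (tl : List Char) (c : Char) (l : List Char) (p : Nat) :
    gcnt tl (c :: l) p = gcnt tl l (gstep tl p c) := rfl

theorem le_gcnt (tl : List Char) (l : List Char) (p : Nat) : p ≤ gcnt tl l p := by
  induction l generalizing p with
  | nil => simp [gcnt]
  | cons c rest ih =>
    rw [gcnt_cons]
    refine le_trans ?_ (ih (gstep tl p c))
    unfold gstep; split <;> omega

theorem gcnt_cap (tl : List Char) (l : List Char) (p : Nat) (hp : tl.length ≤ p) :
    gcnt tl l p = p := by
  induction l generalizing p with
  | nil => rfl
  | cons c rest ih =>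
    rw [gcnt_cons]
    have : tl[p]? = none := List.getElem?_eq_none (by omega)
    simp [gstep, this, ih p hp]

theorem gincs_cap (tl : List Char) (l : List Char) (i p : Nat) (hp : tl.length ≤ p) :
    gincs tl l i p = [] := by
  induction l generalizing i p with
  | nil => rfl
  | cons c rest ih =>
    have : tl[p]? = none := List.getElem?_eq_none (by omega)
    simp only [gincs, this]
    simp only [reduceCtorEq, if_false]
    exact ih (i + 1) p hp

theorem gincs_length (tl : List Char) (l : List Char) (i p : Nat) :
    (gincs tl l i p).length = gcnt tl l p - p := by
  induction l generalizing i p with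
  | nil => simp [gincs, gcnt]
  | cons c rest ih =>
    rw [gcnt_cons]
    unfold gincs gstep
    split
    · have := le_gcnt tl rest (p + 1)
      simp [ih]; omega
    · simp [ih]

theorem gincs_succ (tl : List Char) (l : List Char) (i p : Nat) :
    gincs tl l (i + 1) p = (gincs tl l i p).map (· + 1) := by
  induction l generalizing i p with
  | nil => rfl
  | cons c rest ih =>
    unfold gincs
    split <;> simp [ih]

-- structural greedy count (for the Sublist link)
def sgcnt : List Char → List Char → Nat
  | _, [] => 0
  | [], _ :: _ => 0
  | c :: s, x :: t => if c = x then sgcnt s t + 1 else sgcnt s (x :: t)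

@[simp] theorem sgcnt_nil_right (l : List Char) : sgcnt l [] = 0 := by cases l <;> rfl
@[simp] theorem sgcnt_nil_left (t : List Char) : sgcnt [] t = 0 := by cases t <;> rfl
theorem sgcnt_cons_cons (c x : Char) (s t : List Char) :
    sgcnt (c :: s) (x :: t) = if c = x then sgcnt s t + 1 else sgcnt s (x :: t) := rfl

theorem sgcnt_eq_iff (l t : List Char) : sgcnt l t = t.length ↔ t.Sublist l := by
  induction l generalizing t with
  | nil => cases t <;> simp [sgcnt]
  | cons c s ih =>
    cases t with
    | nil => simp
    | cons x t =>
      rw [sgcnt_cons_cons]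
      split
      · rename_i hcx
        subst hcx
        rw [List.cons_sublist_cons, ← ih]
        simp
      · rename_i hcx
        rw [ih]
        constructor
        · intro h
          exact h.cons c
        · intro h
          cases h with
          | cons _ h => exact h
          | cons₂ _ h => exact absurd rfl hcx

theorem gcnt_eq_sgcnt (tl : List Char) (l : List Char) (p : Nat) (hp : p ≤ tl.length) :
    gcnt tl l p = p + sgcnt l (tl.drop p) := by
  induction l generalizing p with
  | nil => simp [gcnt]
  | cons c rest ih =>
    rw [gcnt_cons]
    unfold gstep
    rcases Nat.lt_or_ge p tl.length with hlt | hge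
    · have hdrop : tl.drop p = tl[p] :: tl.drop (p + 1) := List.drop_eq_getElem_cons hlt
      by_cases hc : tl[p]? = some c
      · have hcc : tl[p] = c := by
          have := List.getElem?_eq_getElem hlt
          rw [this] at hc; exact (Option.some_inj.mp hc)
        rw [if_pos hc, ih (p + 1) (by omega), hdrop, hcc, sgcnt_cons_cons, if_pos rfl]
        omega
      · have hcc : c ≠ tl[p] := by
          have := List.getElem?_eq_getElem hlt
          intro h; exact hc (by rw [this, h])
        rw [if_neg hc, ih p (by omega), hdrop, sgcnt_cons_cons, if_neg hcc]
    · have h1 : tl[p]? = none := List.getElem?_eq_none hge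
      have h2 : tl.drop p = [] := List.drop_eq_nil_of_le hge
      rw [if_neg (by simp [h1]), ih p hp, h2]
      simp

theorem gincs_bounds (tl : List Char) (l : List Char) (i p : Nat) :
    ∀ x ∈ gincs tl l i p, i ≤ x ∧ x < i + l.length := by
  induction l generalizing i p with
  | nil => simp [gincs]
  | cons c rest ih =>
    intro x hx
    unfold gincs at hx
    split at hx
    · rcases List.mem_cons.mp hx with h | h
      · subst h; simp
      · have := ih (i + 1) (p + 1) x h; constructor <;> [omega; (simp; omega)]
    · have := ih (i + 1) p x hx; constructor <;> [omega; (simp; omega)]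

theorem gcnt_take_iff (tl : List Char) (l : List Char) (i p x k : Nat) (hk : 1 ≤ k) :
    p + k ≤ gcnt tl (l.take x) p ↔ ∃ pos, (gincs tl l i p)[k - 1]? = some pos ∧ pos < i + x := by
  induction l generalizing i p x k with
  | nil =>
    simp [gincs, gcnt]
    omega
  | cons c rest ih =>
    cases x with
    | zero =>
      simp only [List.take_zero]
      show p + k ≤ gcnt tl [] p ↔ _
      simp only [gcnt, List.foldl_nil]
      constructor
      · omega
      · rintro ⟨pos, hpos, hlt⟩
        have hmem : pos ∈ gincs tl (c :: rest) i p := List.mem_of_getElem? hpos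
        have := (gincs_bounds tl (c :: rest) i p pos hmem).1
        omega
    | succ x =>
      rw [List.take_succ_cons, gcnt_cons]
      unfold gincs gstep
      by_cases hc : tl[p]? = some c
      · rw [if_pos hc, if_pos hc]
        rcases Nat.eq_or_lt_of_le hk with h1 | h2
        · rw [← h1]
          simp only [Nat.sub_self, List.getElem?_cons_zero]
          constructor
          · intro _; exact ⟨i, rfl, by omega⟩
          · intro _
            have := le_gcnt tl (rest.take x) (p + 1)
            omega
        · have hidx : (i :: gincs tl rest (i + 1) (p + 1))[k - 1]? =
              (gincs tl rest (i + 1) (p + 1))[k - 2]? := by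
            have hk2 : k - 1 = (k - 2) + 1 := by omega
            rw [hk2, List.getElem?_cons_succ]
          rw [hidx]
          have := ih (i + 1) (p + 1) x (k - 1) (by omega)
          have harith : p + k = (p + 1) + (k - 1) := by omega
          have harith2 : (k - 1) - 1 = k - 2 := by omega
          rw [harith, this, harith2]
          constructor
          · rintro ⟨pos, h1, hlt⟩; exact ⟨pos, h1, by omega⟩
          · rintro ⟨pos, h1, hlt⟩; exact ⟨pos, h1, by omega⟩
      · rw [if_neg hc, if_neg hc]
        rw [ih (i + 1) p x k hk]
        constructor
        · rintro ⟨pos, h1, hlt⟩; exact ⟨pos, h1, by omega⟩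
        · rintro ⟨pos, h1, hlt⟩
          refine ⟨pos, h1, ?_⟩
          have hmem : pos ∈ gincs tl rest (i + 1) p := List.mem_of_getElem? h1
          have := (gincs_bounds tl rest (i + 1) p pos hmem).1
          omega

theorem gcnt_full_iff (tl : List Char) (l : List Char) :
    gcnt tl l 0 = tl.length ↔ tl.Sublist l := by
  have := gcnt_eq_sgcnt tl l 0 (by omega)
  simp at this
  rw [this]
  exact sgcnt_eq_iff l tl

theorem gincs_ne_nil (tl : List Char) (l : List Char) (i p : Nat)
    (h : p < gcnt tl l p) : gincs tl l i p ≠ [] := by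
  have := gincs_length tl l i p
  intro hnil
  rw [hnil] at this
  simp at this
  omega

theorem getLast?_map_add_one (X : List Nat) (hX : X ≠ []) :
    ((X.map (· + 1)).getLast?.getD 0) = X.getLast?.getD 0 + 1 := by
  rw [List.getLast?_map]
  obtain ⟨a, ha⟩ := List.getLast?_isSome.mpr hX |> Option.isSome_iff_exists.mp
  rw [ha]
  rfl

theorem getLast?_cons_ne_nil {α : Type} (a : α) (l : List α) (h : l ≠ []) :
    (a :: l).getLast? = l.getLast? := by
  cases l with
  | nil => exact absurd rfl h
  | cons b m => simp [List.getLast?_cons_cons]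

theorem map_cast_shift (X : List Nat) (i : Int) :
    (X.map (· + 1)).map (fun k : Nat => i + (k : Int)) = X.map (fun k : Nat => i + 1 + (k : Int)) := by
  rw [List.map_map]
  apply List.map_congr_left
  intro a _
  simp
  ring

-- A's first loop: if the greedy counter will complete, it returns the increment positions
-- (shifted by the start index) and c1 computed from the last of them
theorem aLoop1_break (tl : List Char) (slenI : Int) (l : List Char) (i : Int) (p : Nat)
    (acc : List Int) (hp : p < tl.length) (hfull : gcnt tl l p = tl.length) :
    aLoop1 tl slenI l i (p : Int) acc =
      (acc ++ (gincs tl l 0 p).map (fun (k : Nat) => i + (k : Int)),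
       slenI - (i + (((gincs tl l 0 p).getLast?.getD 0 : Nat) : Int)) - 1) := by
  induction l generalizing i p acc with
  | nil => simp [gcnt] at hfull; omega
  | cons c rest ih =>
    rw [gcnt_cons] at hfull
    simp only [aLoop1, PySem.List.pyGet?_natCast]
    by_cases hc : tl[p]? = some c
    · have hbeq : (tl[p]? == some c) = true := beq_iff_eq.mpr hc
      have hstep : gstep tl p c = p + 1 := by simp [gstep, hc]
      rw [hstep] at hfull
      simp only [hbeq, if_true]
      have hgi : gincs tl (c :: rest) 0 p = 0 :: (gincs tl rest 0 (p + 1)).map (· + 1) := by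
        show (if tl[p]? = some c then 0 :: gincs tl rest (0 + 1) (p + 1) else gincs tl rest (0 + 1) p) = _
        rw [if_pos hc, gincs_succ]
      by_cases hend : p + 1 = tl.length
      · have hcond : (p : Int) + 1 = (tl.length : Int) := by omega
        rw [if_pos hcond, hgi, gincs_cap tl rest 0 (p + 1) (by omega)]
        simp
      · have hcond : ¬ ((p : Int) + 1 = (tl.length : Int)) := by omega
        rw [if_neg hcond]
        have hcast : (p : Int) + 1 = ((p + 1 : Nat) : Int) := by omega
        rw [hcast, ih (i + 1) (p + 1) (acc ++ [i]) (by omega) hfull, hgi]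
        have hX : gincs tl rest 0 (p + 1) ≠ [] := by
          apply gincs_ne_nil
          omega
        simp only [Prod.mk.injEq]
        constructor
        · rw [List.map_cons, map_cast_shift, List.append_assoc]
          norm_num
        · rw [getLast?_cons_ne_nil _ _ (by simpa using hX)]
          rw [getLast?_map_add_one _ hX]
          push_cast
          ring
    · have hbeq : (tl[p]? == some c) = false := by simp [hc]
      have hstep : gstep tl p c = p := by simp [gstep, hc]
      rw [hstep] at hfull
      simp only [hbeq, if_false, Bool.false_eq_true]
      have hcond : ¬ ((p : Int) = (tl.length : Int)) := by omega
      rw [if_neg hcond]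
      rw [ih (i + 1) p acc hp hfull]
      have hgi : gincs tl (c :: rest) 0 p = (gincs tl rest 0 p).map (· + 1) := by
        show (if tl[p]? = some c then 0 :: gincs tl rest (0 + 1) (p + 1) else gincs tl rest (0 + 1) p) = _
        rw [if_neg hc, gincs_succ]
      rw [hgi]
      have hX : gincs tl rest 0 p ≠ [] := by
        apply gincs_ne_nil
        have := le_gcnt tl rest p
        omega
      simp only [Prod.mk.injEq]
      constructor
      · rw [map_cast_shift]
      · rw [getLast?_map_add_one _ hX]
        push_cast
        ring

theorem map_cast_shift_neg (X : List Nat) (i : Int) :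
    (X.map (· + 1)).map (fun (k : Nat) => i - (k : Int)) = X.map (fun (k : Nat) => i - 1 - (k : Int)) := by
  rw [List.map_map]
  apply List.map_congr_left
  intro a _
  simp
  ring

theorem rev_getElem?_eq (tl : List Char) (q : Nat) (hq : q < tl.length) :
    tl.reverse[q]? = tl[tl.length - 1 - q]? := by
  rw [List.getElem?_reverse (by simpa using hq)]

-- A's second loop (argument: s reversed): returns the rightmost greedy match positions
-- (relative to the start index i, descending, then reversed) and c2 from the last increment
theorem aLoop2_break (tl : List Char) (l : List Char) (i : Int) (q : Nat) (acc : List Int)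
    (hq : q < tl.length) (hfull : gcnt tl.reverse l q = tl.length) :
    aLoop2 tl l i ((tl.length : Int) - 1 - (q : Int)) acc =
      (((gincs tl.reverse l 0 q).map (fun (k : Nat) => i - (k : Int))).reverse ++ acc,
       i - (((gincs tl.reverse l 0 q).getLast?.getD 0 : Nat) : Int)) := by
  induction l generalizing i q acc with
  | nil =>
    have := gcnt_cap tl.reverse [] q
    simp [gcnt] at hfull
    omega
  | cons c rest ih =>
    rw [gcnt_cons] at hfull
    have hidx : (tl.length : Int) - 1 - (q : Int) = (((tl.length - 1 - q : Nat)) : Int) := by omega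
    simp only [aLoop2, hidx, PySem.List.pyGet?_natCast]
    rw [← rev_getElem?_eq tl q hq]
    by_cases hc : tl.reverse[q]? = some c
    · have hbeq : (tl.reverse[q]? == some c) = true := beq_iff_eq.mpr hc
      have hstep : gstep tl.reverse q c = q + 1 := by simp [gstep, hc]
      rw [hstep] at hfull
      simp only [hbeq, if_true]
      have hgi : gincs tl.reverse (c :: rest) 0 q = 0 :: (gincs tl.reverse rest 0 (q + 1)).map (· + 1) := by
        show (if tl.reverse[q]? = some c then 0 :: gincs tl.reverse rest (0 + 1) (q + 1)
              else gincs tl.reverse rest (0 + 1) q) = _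
        rw [if_pos hc, gincs_succ]
      by_cases hend : q + 1 = tl.length
      · have hcond : ((tl.length - 1 - q : Nat) : Int) - 1 = -1 := by omega
        rw [if_pos hcond, hgi, gincs_cap tl.reverse rest 0 (q + 1) (by simp; omega)]
        simp
      · have hcond : ¬ (((tl.length - 1 - q : Nat) : Int) - 1 = -1) := by omega
        rw [if_neg hcond]
        have hcast : ((tl.length - 1 - q : Nat) : Int) - 1 = (tl.length : Int) - 1 - ((q + 1 : Nat) : Int) := by
          omega
        rw [hcast, ih (i - 1) (q + 1) (i :: acc) (by omega) hfull, hgi]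
        have hX : gincs tl.reverse rest 0 (q + 1) ≠ [] := by
          apply gincs_ne_nil
          omega
        simp only [Prod.mk.injEq]
        constructor
        · rw [List.map_cons, map_cast_shift_neg]
          simp
        · rw [getLast?_cons_ne_nil _ _ (by simpa using hX)]
          rw [getLast?_map_add_one _ hX]
          push_cast
          ring
    · have hbeq : (tl.reverse[q]? == some c) = false := by simp [hc]
      have hstep : gstep tl.reverse q c = q := by simp [gstep, hc]
      rw [hstep] at hfull
      simp only [hbeq, if_false, Bool.false_eq_true]
      have hcond : ¬ (((tl.length - 1 - q : Nat) : Int) = -1) := by omega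
      rw [if_neg hcond]
      have hcast : ((tl.length - 1 - q : Nat) : Int) = (tl.length : Int) - 1 - (q : Int) := by omega
      rw [hcast, ih (i - 1) q acc hq hfull]
      have hgi : gincs tl.reverse (c :: rest) 0 q = (gincs tl.reverse rest 0 q).map (· + 1) := by
        show (if tl.reverse[q]? = some c then 0 :: gincs tl.reverse rest (0 + 1) (q + 1)
              else gincs tl.reverse rest (0 + 1) q) = _
        rw [if_neg hc, gincs_succ]
      rw [hgi]
      have hX : gincs tl.reverse rest 0 q ≠ [] := by
        apply gincs_ne_nil
        have := le_gcnt tl.reverse rest q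
        omega
      simp only [Prod.mk.injEq]
      constructor
      · rw [map_cast_shift_neg]
      · rw [getLast?_map_add_one _ hX]
        push_cast
        ring

-- B's pre array: entry x is the greedy counter over the first x characters
theorem bPreList_length (tl : List Char) (l : List Char) (p : Nat) :
    (bPreList tl l p).length = l.length + 1 := by
  induction l generalizing p with
  | nil => rfl
  | cons c rest ih => simp [bPreList, ih]

theorem bstep_eq (tl : List Char) (p : Nat) (c : Char) :
    p + (if p < tl.length ∧ PySem.List.pyGet? tl (p : Int) = some c then 1 else 0) = gstep tl p c := by
  rw [PySem.List.pyGet?_natCast]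
  unfold gstep
  by_cases hc : tl[p]? = some c
  · obtain ⟨h1, -⟩ := List.getElem?_eq_some_iff.mp hc
    rw [if_pos ⟨h1, hc⟩, if_pos hc]
  · rw [if_neg (by tauto), if_neg hc]
    omega

theorem bPreList_getD (tl : List Char) (l : List Char) (p x : Nat) (hx : x ≤ l.length) :
    (bPreList tl l p).getD x 0 = gcnt tl (l.take x) p := by
  induction l generalizing p x with
  | nil =>
    have : x = 0 := by simpa using hx
    subst this
    rfl
  | cons c rest ih =>
    cases x with
    | zero => rfl
    | succ x =>
      simp only [bPreList, List.getD_cons_succ, List.take_succ_cons, gcnt_cons]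
      rw [bstep_eq]
      exact ih (gstep tl p c) x (by simpa using hx)

theorem bSufRev_eq (tl : List Char) (l : List Char) (q : Nat) :
    bSufRev tl l q = bPreList tl.reverse l q := by
  induction l generalizing q with
  | nil => rfl
  | cons c rest ih =>
    simp only [bSufRev, bPreList]
    have hcond : (q < tl.length ∧ PySem.List.pyGet? tl ((tl.length - 1 - q : Nat) : Int) = some c)
        ↔ (q < tl.reverse.length ∧ PySem.List.pyGet? tl.reverse (q : Int) = some c) := by
      simp only [PySem.List.pyGet?_natCast, List.length_reverse]
      constructor
      · rintro ⟨h1, h2⟩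
        exact ⟨h1, by rw [rev_getElem?_eq tl q h1]; exact h2⟩
      · rintro ⟨h1, h2⟩
        exact ⟨h1, by rw [← rev_getElem?_eq tl q h1]; exact h2⟩
    rw [if_congr hcond rfl rfl, ih]

-- the binary search returns the least index z satisfying a (locally) monotone predicate
theorem bLeast_eq (f : Nat → Bool) (z : Nat) :
    ∀ (fuel lo hi : Nat), (∀ w, z ≤ w → w < hi → f w = true) → (∀ w, w < z → f w = false) →
      lo ≤ z → z ≤ hi → hi - lo ≤ fuel → bLeast f fuel lo hi = z := by
  intro fuel
  induction fuel with
  | zero =>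
    intro lo hi _ _ h1 h2 h3
    show lo = z
    omega
  | succ fuel ih =>
    intro lo hi hmono hlow h1 h2 h3
    show (if lo < hi then
        if f ((lo + hi) / 2) then bLeast f fuel lo ((lo + hi) / 2)
        else bLeast f fuel ((lo + hi) / 2 + 1) hi
      else lo) = z
    by_cases hlh : lo < hi
    · rw [if_pos hlh]
      have hmid1 : lo ≤ (lo + hi) / 2 := by omega
      have hmid2 : (lo + hi) / 2 < hi := by omega
      by_cases hf : f ((lo + hi) / 2) = true
      · rw [if_pos hf]
        have hzmid : z ≤ (lo + hi) / 2 := by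
          by_contra hcon
          rw [hlow _ (by omega)] at hf
          exact Bool.false_ne_true hf
        exact ih lo ((lo + hi) / 2) (fun w hw1 hw2 => hmono w hw1 (by omega)) hlow h1 hzmid (by omega)
      · rw [if_neg hf]
        have hzmid : (lo + hi) / 2 < z := by
          by_contra hcon
          exact hf (hmono _ (by omega) hmid2)
        exact ih ((lo + hi) / 2 + 1) hi hmono hlow (by omega) h2 (by omega)
    · rw [if_neg hlh]
      omega

-- the binary search over the pre array finds lp[k-1] + 1 (or 0 for k = 0)
theorem preSearch_eq (tl sl : List Char) (k : Nat) (hk : k ≤ tl.length)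
    (hfull : gcnt tl sl 0 = tl.length) :
    bLeast (fun x => decide (k ≤ (bPreList tl sl 0).getD x 0)) sl.length 0 sl.length
      = if k = 0 then 0 else (gincs tl sl 0 0).getD (k - 1) 0 + 1 := by
  by_cases hk0 : k = 0
  · subst hk0
    rw [if_pos rfl]
    exact bLeast_eq _ 0 sl.length 0 sl.length (fun w _ _ => by simp) (fun w hw => by omega)
      (le_refl 0) (by omega) (by omega)
  · rw [if_neg hk0]
    have hk1 : 1 ≤ k := by omega
    have hlen : (gincs tl sl 0 0).length = tl.length := by
      rw [gincs_length, hfull]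
      omega
    have hklt : k - 1 < (gincs tl sl 0 0).length := by omega
    set pos := (gincs tl sl 0 0).getD (k - 1) 0 with hposdef
    have hsome : (gincs tl sl 0 0)[k - 1]? = some pos := by
      rw [List.getElem?_eq_getElem hklt, hposdef, List.getD_eq_getElem?_getD,
        List.getElem?_eq_getElem hklt]
      rfl
    have hposmem : pos ∈ gincs tl sl 0 0 := by
      exact List.mem_of_getElem? hsome
    have hposlt : pos < sl.length := by
      have := (gincs_bounds tl sl 0 0 pos hposmem).2
      omega
    have hchar : ∀ w, w ≤ sl.length → ((k ≤ gcnt tl (sl.take w) 0) ↔ pos < w) := by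
      intro w hw
      rw [show (k ≤ gcnt tl (sl.take w) 0) ↔ (0 + k ≤ gcnt tl (sl.take w) 0) by omega]
      rw [gcnt_take_iff tl sl 0 0 w k hk1]
      constructor
      · rintro ⟨p', hp', hlt⟩
        rw [hsome] at hp'
        have hpp : pos = p' := by injection hp'
        omega
      · intro hlt
        exact ⟨pos, hsome, by omega⟩
    apply bLeast_eq
    · intro w hw1 hw2
      rw [decide_eq_true_iff, bPreList_getD tl sl 0 w (by omega)]
      exact (hchar w (by omega)).mpr (by omega)
    · intro w hw
      rw [decide_eq_false_iff_not, bPreList_getD tl sl 0 w (by omega)]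
      intro hcon
      have := (hchar w (by omega)).mp hcon
      omega
    · omega
    · omega
    · omega

-- the suffix array read backwards is the pre array of the reversed strings
theorem sufD_eq (tl sl : List Char) (x : Nat) (hx : x ≤ sl.length) :
    ((bSufRev tl sl.reverse 0).reverse).getD (sl.length - x) 0
      = gcnt tl.reverse (sl.reverse.take x) 0 := by
  rw [bSufRev_eq]
  have hlen : (bPreList tl.reverse sl.reverse 0).length = sl.length + 1 := by
    rw [bPreList_length, List.length_reverse]
  rw [List.getD_eq_getElem?_getD, List.getElem?_reverse (by omega)]
  rw [hlen]
  have hidx : sl.length + 1 - 1 - (sl.length - x) = x := by omega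
  rw [hidx, ← List.getD_eq_getElem?_getD]
  exact bPreList_getD tl.reverse sl.reverse 0 x (by simpa using hx)

theorem sufSearch_eq (tl sl : List Char) (k : Nat) (hk : k ≤ tl.length)
    (hfull : gcnt tl.reverse sl.reverse 0 = tl.length) :
    bLeast (fun x => decide (tl.length - k ≤ ((bSufRev tl sl.reverse 0).reverse).getD (sl.length - x) 0))
        sl.length 0 sl.length
      = if k = tl.length then 0 else (gincs tl.reverse sl.reverse 0 0).getD (tl.length - k - 1) 0 + 1 := by
  by_cases hkm : k = tl.length
  · rw [if_pos hkm, hkm]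
    exact bLeast_eq _ 0 sl.length 0 sl.length (fun w _ _ => by simp) (fun w hw => by omega)
      (le_refl 0) (by omega) (by omega)
  · rw [if_neg hkm]
    have hc1 : 1 ≤ tl.length - k := by omega
    have hlen : (gincs tl.reverse sl.reverse 0 0).length = tl.length := by
      rw [gincs_length, hfull]
      omega
    have hklt : tl.length - k - 1 < (gincs tl.reverse sl.reverse 0 0).length := by omega
    set pos := (gincs tl.reverse sl.reverse 0 0).getD (tl.length - k - 1) 0 with hposdef
    have hsome : (gincs tl.reverse sl.reverse 0 0)[tl.length - k - 1]? = some pos := by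
      rw [List.getElem?_eq_getElem hklt, hposdef, List.getD_eq_getElem?_getD,
        List.getElem?_eq_getElem hklt]
      rfl
    have hposmem : pos ∈ gincs tl.reverse sl.reverse 0 0 := List.mem_of_getElem? hsome
    have hposlt : pos < sl.length := by
      have := (gincs_bounds tl.reverse sl.reverse 0 0 pos hposmem).2
      simp at this
      omega
    have hchar : ∀ w, w ≤ sl.length →
        ((tl.length - k ≤ gcnt tl.reverse (sl.reverse.take w) 0) ↔ pos < w) := by
      intro w hw
      rw [show (tl.length - k ≤ gcnt tl.reverse (sl.reverse.take w) 0)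
          ↔ (0 + (tl.length - k) ≤ gcnt tl.reverse (sl.reverse.take w) 0) by omega]
      rw [gcnt_take_iff tl.reverse sl.reverse 0 0 w (tl.length - k) hc1]
      constructor
      · rintro ⟨p', hp', hlt⟩
        rw [hsome] at hp'
        have hpp : pos = p' := by injection hp'
        omega
      · intro hlt
        exact ⟨pos, hsome, by omega⟩
    apply bLeast_eq
    · intro w hw1 hw2
      rw [decide_eq_true_iff, sufD_eq tl sl w (by omega)]
      exact (hchar w (by omega)).mpr (by omega)
    · intro w hw
      rw [decide_eq_false_iff_not, sufD_eq tl sl w (by omega)]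
      intro hcon
      have := (hchar w (by omega)).mp hcon
      omega
    · omega
    · omega
    · omega

-- B's running-best option fold is a max fold
theorem foldl_best (g : Nat → Int) : ∀ (L : List Nat) (b : Int),
    L.foldl (fun best k => match best with
      | none => some (g k)
      | some b => if b < g k then some (g k) else some b) (some b)
      = some (L.foldl (fun a k => max a (g k)) b) := by
  intro L
  induction L with
  | nil => intro b; rfl
  | cons c L ih =>
    intro b
    simp only [List.foldl_cons]
    rw [show (if b < g c then some (g c) else some b) = some (max b (g c)) by
      rcases lt_or_ge b (g c) with h | h
      · rw [if_pos h, max_eq_right (le_of_lt h)]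
      · rw [if_neg (by omega), max_eq_left h]]
    exact ih (max b (g c))

theorem foldl_max_max (h : Nat → Int) (L : List Nat) : ∀ a b : Int,
    L.foldl (fun x y => max x (h y)) (max a b) = max a (L.foldl (fun x y => max x (h y)) b) := by
  induction L with
  | nil => intro a b; rfl
  | cons c L ih =>
    intro a b
    simp only [List.foldl_cons]
    rw [max_assoc, ih a (max b (h c))]

-- main case: t nonempty and a subsequence of s: both programs compute the maximum
-- over all split points k of t of the window determined by the k-th greedy positions
theorem main_case (s t : String) (hne : t.toList ≠ []) (hsub : t.toList.Sublist s.toList) :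
    solve s t = solve_alt s t := by
  set sl := s.toList with hsl
  set tl := t.toList with htl
  set n := sl.length with hn
  set m := tl.length with hm
  have hm1 : 1 ≤ m := List.length_pos_of_ne_nil hne
  have hfull : gcnt tl sl 0 = m := (gcnt_full_iff tl sl).mpr hsub
  have hrsub : tl.reverse.Sublist sl.reverse := List.reverse_sublist.mpr hsub
  have hrfull : gcnt tl.reverse sl.reverse 0 = m := by
    have := (gcnt_full_iff tl.reverse sl.reverse).mpr hrsub
    simpa using this
  set lp := gincs tl sl 0 0 with hlp
  set rp := gincs tl.reverse sl.reverse 0 0 with hrp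
  have hlplen : lp.length = m := by rw [hlp, gincs_length, hfull]; omega
  have hrplen : rp.length = m := by rw [hrp, gincs_length, hrfull]; omega
  have hrpboundD : (rp.getD (m - 1) 0) < n := by
    have hmem : rp.getD (m - 1) 0 ∈ rp := by
      rw [List.getD_eq_getElem?_getD, List.getElem?_eq_getElem (by omega : m - 1 < rp.length)]
      exact List.getElem_mem _
    have := (gincs_bounds tl.reverse sl.reverse 0 0 _ hmem).2
    simp only [List.length_reverse] at this
    omega
  set g : Nat → Int := fun k =>
    (n : Int) - ((if k = m then 0 else rp.getD (m - k - 1) 0 + 1 : Nat) : Int)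
      - ((if k = 0 then 0 else lp.getD (k - 1) 0 + 1 : Nat) : Int) with hg
  have hlpLast : lp.getLast?.getD 0 = lp.getD (m - 1) 0 := by
    rw [List.getLast?_eq_getElem?, hlplen, List.getD_eq_getElem?_getD]
  have hrpLast : rp.getLast?.getD 0 = rp.getD (m - 1) 0 := by
    rw [List.getLast?_eq_getElem?, hrplen, List.getD_eq_getElem?_getD]
  -- A's first loop
  have hL0 : aLoop1 tl (n : Int) sl 0 0 []
      = (lp.map (fun (k : Nat) => (k : Int)), (n : Int) - (lp.getD (m - 1) 0 : Nat) - 1) := by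
    have h := aLoop1_break tl (n : Int) sl 0 0 [] (by omega) hfull
    rw [show ((0 : Nat) : Int) = (0 : Int) by omega] at h
    rw [h]
    rw [← hlp, hlpLast]
    simp
  -- A's second loop
  have hR0 : aLoop2 tl sl.reverse ((n : Int) - 1) ((m : Int) - 1) []
      = ((rp.map (fun (k : Nat) => (n : Int) - 1 - (k : Int))).reverse,
         (n : Int) - 1 - (rp.getD (m - 1) 0 : Nat)) := by
    have h := aLoop2_break tl sl.reverse ((n : Int) - 1) 0 [] (by omega) (by simpa using hrfull)
    rw [show ((m : Int) - 1 - ((0 : Nat) : Int)) = (m : Int) - 1 by omega] at h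
    rw [h]
    rw [← hrp, hrpLast]
    simp
  -- value of A
  have hA : solve s t
      = max ((n : Int) - (lp.getD (m - 1) 0 : Nat) - 1)
          (max ((n : Int) - 1 - (rp.getD (m - 1) 0 : Nat))
            ((List.range (m - 1)).foldl (fun a i => max a (g (i + 1))) (-1))) := by
    have hterm : ∀ (a : Int) (i : Nat), i ∈ List.range (m - 1) →
        max a ((PySem.List.pyGet? ((rp.map (fun (k : Nat) => (n : Int) - 1 - (k : Int))).reverse) ((i : Int) + 1)).getD 0
          - (PySem.List.pyGet? (lp.map (fun (k : Nat) => (k : Int))) (i : Int)).getD 0 - 1)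
        = max a (g (i + 1)) := by
      intro a i hi
      have hilt : i < m - 1 := List.mem_range.mp hi
      have hlv : (PySem.List.pyGet? (lp.map (fun (k : Nat) => (k : Int))) (i : Int)).getD 0
          = (lp.getD i 0 : Int) := by
        rw [PySem.List.pyGet?_natCast, List.getElem?_map,
          List.getElem?_eq_getElem (by omega : i < lp.length)]
        simp [List.getD_eq_getElem?_getD, List.getElem?_eq_getElem (by omega : i < lp.length)]
      have hrv : (PySem.List.pyGet? ((rp.map (fun (k : Nat) => (n : Int) - 1 - (k : Int))).reverse) ((i : Int) + 1)).getD 0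
          = (n : Int) - 1 - (rp.getD (m - i - 2) 0 : Int) := by
        rw [show ((i : Int) + 1) = ((i + 1 : Nat) : Int) by omega]
        rw [PySem.List.pyGet?_natCast,
          List.getElem?_reverse (by simp only [List.length_map, hrplen]; omega)]
        simp only [List.length_map, hrplen]
        rw [List.getElem?_map, List.getElem?_eq_getElem (by omega : m - 1 - (i + 1) < rp.length)]
        have hidx : m - 1 - (i + 1) = m - i - 2 := by omega
        simp [hidx, List.getD_eq_getElem?_getD,
          List.getElem?_eq_getElem (by omega : m - i - 2 < rp.length)]
      rw [hlv, hrv, hg]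
      simp only [if_neg (by omega : ¬ (i + 1 = m)), if_neg (by omega : ¬ (i + 1 = 0))]
      have hidx2 : m - (i + 1) - 1 = m - i - 2 := by omega
      rw [hidx2]
      push_cast
      ring_nf
    have hc3 := PySem.List.foldl_congr_mem (List.range (m - 1)) _ _ (-1 : Int) hterm
    simp only [solve, ← hsl, ← htl, ← hn, ← hm, hL0, hR0]
    rw [hc3]
  -- value of B
  have hguard : (bPreList tl sl 0).getD n 0 = m := by
    rw [bPreList_getD tl sl 0 n (le_refl n), List.take_length]
    exact hfull
  have hB : solve_alt s t
      = max ((List.range (m - 1)).foldl (fun a i => max a (g (i + 1))) (g 0)) (g m) := by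
    have hgap : ∀ k, k ∈ List.range (m + 1) →
        (n : Int) - (bLeast (fun x => decide (m - k ≤ (bSufRev tl sl.reverse 0).reverse.getD (n - x) 0)) n 0 n : Nat)
          - (bLeast (fun x => decide (k ≤ (bPreList tl sl 0).getD x 0)) n 0 n : Nat) = g k := by
      intro k hk
      have hkm : k ≤ tl.length := by
        have := List.mem_range.mp hk
        omega
      rw [hn, hm]
      rw [preSearch_eq tl sl k hkm hfull, sufSearch_eq tl sl k hkm hrfull, hg]
    have hbody : ∀ (best : Option Int), ∀ k ∈ List.range (m + 1),
        (match best with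
         | none => some ((n : Int) - (bLeast (fun x => decide (m - k ≤ (bSufRev tl sl.reverse 0).reverse.getD (n - x) 0)) n 0 n : Nat) - (bLeast (fun x => decide (k ≤ (bPreList tl sl 0).getD x 0)) n 0 n : Nat))
         | some b => if b < (n : Int) - (bLeast (fun x => decide (m - k ≤ (bSufRev tl sl.reverse 0).reverse.getD (n - x) 0)) n 0 n : Nat) - (bLeast (fun x => decide (k ≤ (bPreList tl sl 0).getD x 0)) n 0 n : Nat) then some ((n : Int) - (bLeast (fun x => decide (m - k ≤ (bSufRev tl sl.reverse 0).reverse.getD (n - x) 0)) n 0 n : Nat) - (bLeast (fun x => decide (k ≤ (bPreList tl sl 0).getD x 0)) n 0 n : Nat)) else some b)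
        = (match best with
           | none => some (g k)
           | some b => if b < g k then some (g k) else some b) := by
      intro best k hk
      rw [hgap k hk]
    have hfold1 := PySem.List.foldl_congr_mem (List.range (m + 1)) _ _ (none : Option Int) hbody
    simp only [solve_alt, ← hsl, ← htl, ← hn, ← hm, hguard, lt_irrefl]
    rw [if_neg not_false]
    rw [hfold1]
    have hsplit : List.range (m + 1) = 0 :: List.map Nat.succ (List.range m) :=
      List.range_succ_eq_map
    rw [hsplit, List.foldl_cons]
    show (((List.map Nat.succ (List.range m)).foldl _ (some (g 0))).getD 0) = _
    rw [foldl_best g (List.map Nat.succ (List.range m)) (g 0), Option.getD_some, List.foldl_map]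
    have hrange : List.range m = List.range (m - 1) ++ [m - 1] := by
      rw [← List.range_succ]
      congr 1
      omega
    rw [hrange, List.foldl_append, List.foldl_cons, List.foldl_nil]
    have hsucc : m - 1 + 1 = m := by omega
    simp only [Nat.succ_eq_add_one, hsucc]
  -- the three corner candidates
  have hgm : g m = (n : Int) - (lp.getD (m - 1) 0 : Nat) - 1 := by
    rw [hg]
    simp only [if_neg (by omega : ¬ (m = 0))]
    push_cast
    ring
  have hg0 : g 0 = (n : Int) - 1 - (rp.getD (m - 1) 0 : Nat) := by
    rw [hg]
    simp only [if_neg (by omega : ¬ ((0 : Nat) = m))]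
    have : m - 0 - 1 = m - 1 := by omega
    rw [this]
    push_cast
    ring
  have hge0 : (-1 : Int) ≤ g 0 := by
    rw [hg0]
    omega
  rw [hA, hB, ← hgm, ← hg0]
  have hfold : (List.range (m - 1)).foldl (fun a i => max a (g (i + 1))) (g 0)
      = max (g 0) ((List.range (m - 1)).foldl (fun a i => max a (g (i + 1))) (-1)) := by
    rw [← foldl_max_max (fun i => g (i + 1)) (List.range (m - 1)) (g 0) (-1)]
    rw [max_eq_left hge0]
  rw [hfold]
  exact (max_comm _ _)

-- ===== VERDICT (by name: the statement is the Claim_ definition above) =====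
theorem solve_spec : Claim_unchanged_solve := by
  intro s t _ hpre hnd
  show solve s t = solve_alt s t
  rcases hpre with ⟨ht, hs⟩ | ⟨hne, hsub⟩
  · exact absurd ⟨hs, ht⟩ hnd
  · exact main_case s t hne hsub

theorem solve_changed : Claim_changed_solve := by
  unfold Claim_changed_solve; decide

theorem solve_tight : Claim_exact_solve := by
  intro s t _ _ hd
  obtain ⟨hs, ht⟩ := hd
  have h1 : solve s t = -1 := by
    simp only [solve, hs, ht]
    rfl
  have h2 : solve_alt s t = 0 := by
    simp only [solve_alt, hs, ht]
    rfl
  rw [h1, h2]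
  decide
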